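-- pv_equiv track=rewrite | github.com/DatHydroGuy/PyHue2 | Game/Shared/TransitionCreator.py | __horizontal_swipes_matrix_core
-- ===== SOURCE A (Python) =====
-- def __horizontal_swipes_matrix_core(width: int, height: int) -> list[list[int]]:
--     matrix = [[0] * width for _ in range(height)]
--     counter = 0
--     for row in range(height // 2):
--         for column in range(width):
--             if row % 2 == 0:
--                 matrix[row][column] = counter
--             else:
--                 matrix[row][width - column - 1] = counter
--             counter += 1
--         matrix[height - row - 1] = matrix[row][::-1]
--
--     row = height // 2
--     if height % 2 == 1:
--         max_width = (width + 1) // 2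
--
--         for column in range(max_width):
--             matrix[row][column] = counter
--             matrix[row][width - column - 1] = counter
--             counter += 1
--
--     return matrix
-- ===== SOURCE B (Python) =====
-- def __horizontal_swipes_matrix_core(width: int, height: int) -> list[list[int]]:
--     half = height // 2
--
--     def value(r: int, c: int) -> int:
--         if r < half:
--             return r * width + (c if r % 2 == 0 else width - 1 - c)
--         if height - 1 - r < half:
--             return (height - 1 - r) * width + (width - 1 - c if (height - 1 - r) % 2 == 0 else c)
--         return half * width + min(c, width - 1 - c)
--
--     return [[value(r, c) for c in range(width)] for r in range(height)]
-- ===== Notes on version B (the rewrite author's own statement) =====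
-- stated objective: simpler
-- what changed: B replaces A's mutate-in-place scheme (fill the top half with a running counter, mirror each row into the bottom half with [::-1], then stitch the middle row from both ends) by a single comprehension that writes every cell directly from a closed-form index formula, eliminating the counter, all in-place assignment and the slice-reversal.
import Mathlib
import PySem

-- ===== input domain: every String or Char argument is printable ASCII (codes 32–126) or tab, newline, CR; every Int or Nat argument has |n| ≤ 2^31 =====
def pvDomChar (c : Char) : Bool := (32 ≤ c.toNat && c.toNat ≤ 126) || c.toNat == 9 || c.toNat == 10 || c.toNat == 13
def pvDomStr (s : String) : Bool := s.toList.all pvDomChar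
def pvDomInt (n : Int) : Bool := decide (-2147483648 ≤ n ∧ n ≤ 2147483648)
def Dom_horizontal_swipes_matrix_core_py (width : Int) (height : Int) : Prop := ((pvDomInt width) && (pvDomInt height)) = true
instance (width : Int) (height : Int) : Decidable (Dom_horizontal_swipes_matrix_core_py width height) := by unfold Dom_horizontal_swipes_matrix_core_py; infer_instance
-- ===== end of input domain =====

-- B computes every cell from a closed-form boustrophedon index formula instead of A's
-- half-fill-with-counter plus slice-mirroring; objective: simpler. A raises IndexError for
-- negative odd height with positive width; those inputs are excluded by Pre_.


-- ===== PORT A =====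
-- Python list index assignment xs[i] = v (negative i counts from the end; out-of-range would
-- raise IndexError in Python — such inputs are excluded by Pre_, here the list is unchanged)
def pvSetI {α : Type} (xs : List α) (i : Int) (v : α) : List α :=
  let j : Int := if i < 0 then (xs.length : Int) + i else i
  if 0 ≤ j ∧ j < (xs.length : Int) then xs.set j.toNat v else xs

-- matrix[r][c] = v
def pvCell (m : List (List Int)) (r c : Int) (v : Int) : List (List Int) :=
  match PySem.List.pyGet? m r with
  | some rowL => pvSetI m r (pvSetI rowL c v)
  | none => m

-- body of 'for column in range(width)'
def pvInnerBody (width row : Int) (t : List (List Int) × Int) (column : Int) :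
    List (List Int) × Int :=
  (if row % 2 == 0 then pvCell t.1 row column t.2 else pvCell t.1 row (width - column - 1) t.2,
   t.2 + 1)

-- matrix[row][::-1] via PySem.List.slice?
def pvRevRow (m : List (List Int)) (row : Int) : List Int :=
  match PySem.List.pyGet? m row with
  | some rowL => (PySem.List.slice? rowL none none (-1)).getD []
  | none => []

-- after the column loop: matrix[height - row - 1] = matrix[row][::-1]
def pvOuterUpd (height : Int) (row : Int) (s' : List (List Int) × Int) :
    List (List Int) × Int :=
  (pvSetI s'.1 (height - row - 1) (pvRevRow s'.1 row), s'.2)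

-- body of 'for row in range(height // 2)'
def pvOuterBody (width height : Int) (s : List (List Int) × Int) (row : Int) :
    List (List Int) × Int :=
  pvOuterUpd height row ((PySem.List.pyRange 0 width 1).foldl (pvInnerBody width row) s)

-- body of 'for column in range(max_width)'
def pvMidBody (width row : Int) (t : List (List Int) × Int) (column : Int) :
    List (List Int) × Int :=
  (pvCell (pvCell t.1 row column t.2) row (width - column - 1) t.2, t.2 + 1)

-- 'if height % 2 == 1: …' tail of A (row = height // 2 re-read where used)
def pvFinish (width height : Int) (s : List (List Int) × Int) : List (List Int) :=
  if height % 2 == 1 then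
    ((PySem.List.pyRange 0 (PySem.Int.floordiv (width + 1) 2) 1).foldl
       (pvMidBody width (PySem.Int.floordiv height 2)) s).1
  else s.1

def horizontal_swipes_matrix_core_py (width : Int) (height : Int) : List (List Int) :=
  pvFinish width height
    ((PySem.List.pyRange 0 (PySem.Int.floordiv height 2) 1).foldl
       (pvOuterBody width height)
       ((PySem.List.pyRange 0 height 1).map (fun _ => List.replicate width.toNat (0:Int)), 0))

-- ===== PORT B =====
def pvAltValue (width height half r c : Int) : Int :=
  if r < half then r * width + (if r % 2 == 0 then c else width - 1 - c)
  else if height - 1 - r < half then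
    (height - 1 - r) * width + (if (height - 1 - r) % 2 == 0 then width - 1 - c else c)
  else half * width + min c (width - 1 - c)

def horizontal_swipes_matrix_core_py_alt (width : Int) (height : Int) : List (List Int) :=
  (PySem.List.pyRange 0 height 1).map (fun r =>
    (PySem.List.pyRange 0 width 1).map (fun c =>
      pvAltValue width height (PySem.Int.floordiv height 2) r c))

-- ===== PRECONDITION & SPEC =====
-- Pre_ excludes exactly the inputs on which A raises IndexError: height negative and odd
-- together with width ≥ 1 (A then indexes the empty matrix at a negative middle row).
def Pre_horizontal_swipes_matrix_core_py (width : Int) (height : Int) : Prop :=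
  0 ≤ height ∨ width ≤ 0 ∨ height % 2 = 0
instance (width : Int) (height : Int) : Decidable (Pre_horizontal_swipes_matrix_core_py width height) := by
  unfold Pre_horizontal_swipes_matrix_core_py; infer_instance

def pvWitness_horizontal_swipes_matrix_core_py : Int × Int := (3, 3)

def Spec_horizontal_swipes_matrix_core_py (width : Int) (height : Int) (out : List (List Int)) : Prop :=
  out = horizontal_swipes_matrix_core_py_alt width height
instance (width : Int) (height : Int) (out : List (List Int)) : Decidable (Spec_horizontal_swipes_matrix_core_py width height out) := by
  unfold Spec_horizontal_swipes_matrix_core_py; infer_instance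

-- ===== CLAIM (what is proved, stated in full; the proofs are below) =====
def Claim_equal_horizontal_swipes_matrix_core_py : Prop :=
  ∀ (width : Int) (height : Int), Dom_horizontal_swipes_matrix_core_py width height →
    Pre_horizontal_swipes_matrix_core_py width height →
    Spec_horizontal_swipes_matrix_core_py width height (horizontal_swipes_matrix_core_py width height)

-- ===== LEMMAS AND PROOFS =====

def pvCil (n : Nat) : List Int := (List.range n).map (fun k : Nat => (k : Int))

-- the canonical row/matrix shapes A's loops build (proof-only definitions)
def pvRowTop (W r : Nat) : List Int :=
  (List.range W).map (fun c =>
    if r % 2 = 0 then ((r * W + c : Nat) : Int) else ((r * W + (W - 1 - c) : Nat) : Int))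

def pvFk (W H K : Nat) (j : Nat) : List Int :=
  if j < K then pvRowTop W j
  else if H - 1 - j < K then (pvRowTop W (H - 1 - j)).reverse
  else List.replicate W (0 : Int)

def pvRowMid (W K n : Nat) : List Int :=
  (List.range W).map (fun c =>
    if c < n ∨ W ≤ c + n then ((K * W + min c (W - 1 - c) : Nat) : Int) else 0)

lemma pvRange_toNat (w : Int) :
    PySem.List.pyRange 0 w 1 = pvCil w.toNat := by
  rw [PySem.List.pyRange_one]
  unfold pvCil
  simp

lemma pvFloordiv_toNat_two (h : Int) :
    (PySem.Int.floordiv h 2).toNat = h.toNat / 2 := by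
  rcases le_or_gt 0 h with hh | hh
  · obtain ⟨n, rfl⟩ := Int.eq_ofNat_of_zero_le hh
    have : ((2:Int)) = ((2:Nat):Int) := by norm_num
    rw [this, PySem.Int.floordiv_natCast]
    omega
  · have h1 : PySem.Int.floordiv h 2 ≤ 0 := by
      by_contra hc
      push Not at hc
      have := (PySem.Int.le_floordiv_iff_mul_le (a := h) (b := 2) (q := 1) (by norm_num)).mp hc
      omega
    rw [Int.toNat_of_nonpos h1, Int.toNat_of_nonpos (by omega)]


lemma pvSetI_natCast {α : Type} (xs : List α) (c : Nat) (v : α) (h : c < xs.length) :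
    pvSetI xs (c : Int) v = xs.set c v := by
  unfold pvSetI
  have h0 : ¬ ((c:Int) < 0) := by omega
  simp only [h0, if_false]
  have h1 : (0:Int) ≤ (c:Int) ∧ (c:Int) < (xs.length : Int) := by
    constructor <;> omega
  rw [if_pos h1]
  simp


lemma set_map_range {α : Type} (n i : Nat) (f : Nat → α) (v : α) :
    ((List.range n).map f).set i v
      = (List.range n).map (fun j => if j = i then v else f j) := by
  apply List.ext_getElem
  · simp
  · intro j h1 h2
    simp only [List.getElem_set, List.getElem_map, List.getElem_range]
    simp only [List.length_set, List.length_map, List.length_range] at h1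
    by_cases hj : i = j
    · subst hj; simp
    · rw [if_neg hj, if_neg (by omega)]


lemma map_range_congr {α : Type} (n : Nat) (f g : Nat → α) (h : ∀ j, j < n → f j = g j) :
    (List.range n).map f = (List.range n).map g := by
  apply List.map_congr_left
  intro j hj
  exact h j (List.mem_range.mp hj)


lemma reverse_map_range {α : Type} (n : Nat) (f : Nat → α) :
    ((List.range n).map f).reverse = (List.range n).map (fun c => f (n - 1 - c)) := by
  apply List.ext_getElem
  · simp
  · intro j h1 h2
    simp only [List.getElem_reverse, List.getElem_map, List.getElem_range]
    simp only [List.length_reverse, List.length_map, List.length_range] at h1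
    congr 1
    simp


lemma pvCell_set (H : Nat) (F : Nat → List Int) (r : Nat) (hr : r < H)
    (R : List Int) (hFr : F r = R) (c : Nat) (hc : c < R.length) (v : Int) :
    pvCell ((List.range H).map F) (r : Int) ((c : Nat) : Int) v
      = (List.range H).map (fun j => if j = r then R.set c v else F j) := by
  unfold pvCell
  have hg : PySem.List.pyGet? ((List.range H).map F) ((r : Nat) : Int) = some (F r) := by
    rw [PySem.List.pyGet?_natCast]
    simp [hr]
  rw [hg]
  change pvSetI ((List.range H).map F) ((r : Nat) : Int) (pvSetI (F r) ((c : Nat) : Int) v) = _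
  rw [hFr, pvSetI_natCast R c v hc,
      pvSetI_natCast _ r _ (by simp [hr]), set_map_range]

lemma inner_aux_even (width : Int) (W H r : Nat) (hW : W = width.toNat) (hr : r < H)
    (hre : r % 2 = 0) (c0 : Int) (F : Nat → List Int)
    (hF : F r = List.replicate W (0 : Int)) (n : Nat) (hn : n ≤ W) :
    (pvCil n).foldl (pvInnerBody width (r : Int))
        ((List.range H).map F, c0)
      = ((List.range H).map (fun j => if j = r then
            (List.range W).map (fun c => if c < n then c0 + (c : Int) else 0) else F j),
         c0 + (n : Int)) := by
  induction n with
  | zero =>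
      simp only [pvCil, List.range_zero, List.map_nil, List.foldl_nil, Nat.cast_zero, add_zero]
      rw [Prod.mk.injEq]
      refine ⟨?_, rfl⟩
      apply map_range_congr
      intro j hj
      by_cases hj' : j = r
      · subst hj'
        rw [if_pos rfl, hF]
        apply List.ext_getElem <;> simp
      · rw [if_neg hj']
  | succ n ih =>
      have hn' : n ≤ W := by omega
      rw [show pvCil (n+1) = pvCil n ++ [(n:Int)] by
            unfold pvCil; rw [List.range_succ, List.map_append]; rfl,
          List.foldl_append, ih hn']
      simp only [List.foldl_cons, List.foldl_nil]
      unfold pvInnerBody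
      have hpar : (((r : Int)) % 2 == 0) = true := by
        have : ((r : Int)) % 2 = 0 := by omega
        simp [this]
      rw [if_pos hpar]
      rw [pvCell_set H _ r hr
            ((List.range W).map (fun c => if c < n then c0 + (c : Int) else 0))
            (by rw [if_pos rfl]) n (by simp; omega) (c0 + (n : Int)),
          set_map_range]
      rw [Prod.mk.injEq]
      constructor
      · apply map_range_congr
        intro j hj
        by_cases hj' : j = r
        · subst hj'
          rw [if_pos rfl, if_pos rfl]
          apply map_range_congr
          intro c hc
          by_cases hcn : c = n
          · subst hcn
            rw [if_pos rfl, if_pos (by omega)]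
          · rw [if_neg hcn]
            by_cases hlt : c < n
            · rw [if_pos hlt, if_pos (by omega)]
            · rw [if_neg hlt, if_neg (by omega)]
        · rw [if_neg hj', if_neg hj', if_neg hj']
      · push_cast
        ring

lemma inner_aux_odd (width : Int) (W H r : Nat) (hW : W = width.toNat) (hr : r < H)
    (hre : r % 2 = 1) (c0 : Int) (F : Nat → List Int)
    (hF : F r = List.replicate W (0 : Int)) (n : Nat) (hn : n ≤ W) :
    (pvCil n).foldl (pvInnerBody width (r : Int))
        ((List.range H).map F, c0)
      = ((List.range H).map (fun j => if j = r then
            (List.range W).map (fun c =>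
              if W ≤ c + n then c0 + ((W - 1 - c : Nat) : Int) else 0) else F j),
         c0 + (n : Int)) := by
  induction n with
  | zero =>
      simp only [pvCil, List.range_zero, List.map_nil, List.foldl_nil, Nat.cast_zero, add_zero]
      rw [Prod.mk.injEq]
      refine ⟨?_, rfl⟩
      apply map_range_congr
      intro j hj
      by_cases hj' : j = r
      · subst hj'
        rw [if_pos rfl, hF]
        apply List.ext_getElem
        · simp
        · intro i h1 h2
          simp only [List.getElem_replicate, List.getElem_map, List.getElem_range]
          rw [if_neg (by simp at h1; omega)]
      · rw [if_neg hj']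
  | succ n ih =>
      have hn' : n ≤ W := by omega
      have hwcast : width = (W : Int) := by omega
      rw [show pvCil (n+1) = pvCil n ++ [(n:Int)] by
            unfold pvCil; rw [List.range_succ, List.map_append]; rfl,
          List.foldl_append, ih hn']
      simp only [List.foldl_cons, List.foldl_nil]
      unfold pvInnerBody
      have hpar : (((r : Int)) % 2 == 0) = false := by
        have : ((r : Int)) % 2 = 1 := by omega
        simp [this]
      rw [if_neg (by simp [hpar])]
      have hidx : width - (n : Int) - 1 = ((W - 1 - n : Nat) : Int) := by
        rw [hwcast]; omega
      rw [hidx]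
      rw [pvCell_set H _ r hr
            ((List.range W).map (fun c =>
              if W ≤ c + n then c0 + ((W - 1 - c : Nat) : Int) else 0))
            (by rw [if_pos rfl]) (W - 1 - n) (by simp; omega) (c0 + (n : Int)),
          set_map_range]
      rw [Prod.mk.injEq]
      constructor
      · apply map_range_congr
        intro j hj
        by_cases hj' : j = r
        · subst hj'
          rw [if_pos rfl, if_pos rfl]
          apply map_range_congr
          intro c hc
          by_cases hcn : c = W - 1 - n
          · subst hcn
            rw [if_pos rfl, if_pos (by omega)]
            congr 2
            omega
          · rw [if_neg hcn]
            by_cases hle : W ≤ c + n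
            · rw [if_pos hle, if_pos (by omega)]
            · rw [if_neg hle, if_neg (by omega)]
        · rw [if_neg hj', if_neg hj', if_neg hj']
      · push_cast
        ring

-- the inner column loop fills row r boustrophedon-wise and advances the counter by W
lemma inner_fold (width : Int) (W H : Nat) (hW : W = width.toNat)
    (F : Nat → List Int) (r : Nat) (hr : r < H) (hF : F r = List.replicate W (0 : Int)) :
    (PySem.List.pyRange 0 width 1).foldl (pvInnerBody width (r : Int))
        ((List.range H).map F, ((r * W : Nat) : Int))
      = ((List.range H).map (fun j => if j = r then pvRowTop W r else F j),
         (((r + 1) * W : Nat) : Int)) := by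
  rw [pvRange_toNat, ← hW]
  rcases Nat.even_or_odd r with hpar | hpar
  · have hre : r % 2 = 0 := Nat.even_iff.mp hpar
    rw [inner_aux_even width W H r hW hr hre _ F hF W le_rfl, Prod.mk.injEq]
    constructor
    · apply map_range_congr
      intro j hj
      by_cases hj' : j = r
      · subst hj'
        rw [if_pos rfl, if_pos rfl]
        unfold pvRowTop
        apply map_range_congr
        intro c hc
        rw [if_pos hc, if_pos hre]
        push_cast
        ring
      · rw [if_neg hj', if_neg hj']
    · push_cast
      ring
  · have hre : r % 2 = 1 := Nat.odd_iff.mp hpar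
    rw [inner_aux_odd width W H r hW hr hre _ F hF W le_rfl, Prod.mk.injEq]
    constructor
    · apply map_range_congr
      intro j hj
      by_cases hj' : j = r
      · subst hj'
        rw [if_pos rfl, if_pos rfl]
        unfold pvRowTop
        apply map_range_congr
        intro c hc
        rw [if_pos (by omega), if_neg (by omega)]
        omega
      · rw [if_neg hj', if_neg hj']
    · push_cast
      ring

lemma pvGet_map (H : Nat) (G : Nat → List Int) (k : Nat) (hk : k < H) :
    PySem.List.pyGet? ((List.range H).map G) ((k : Nat) : Int) = some (G k) := by
  rw [PySem.List.pyGet?_natCast]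
  simp [hk]

lemma pvRevRow_map (H : Nat) (G : Nat → List Int) (k : Nat) (hk : k < H)
    (R : List Int) (hGk : G k = R) :
    pvRevRow ((List.range H).map G) ((k : Nat) : Int) = R.reverse := by
  unfold pvRevRow
  rw [pvGet_map H G k hk]
  change (PySem.List.slice? (G k) none none (-1)).getD [] = _
  rw [hGk, PySem.List.slice?_none_none_neg_one]
  rfl

lemma pvFk_untouched (W H k : Nat) (hk : 2 * k + 2 ≤ H) :
    pvFk W H k k = List.replicate W (0 : Int) := by
  unfold pvFk
  rw [if_neg (by omega), if_neg (by omega)]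

lemma pvFk_succ_self (W H k : Nat) :
    pvFk W H (k + 1) k = pvRowTop W k := by
  unfold pvFk
  rw [if_pos (by omega)]

lemma pvFk_succ_bot (W H k : Nat) (hk : 2 * k + 2 ≤ H) :
    pvFk W H (k + 1) (H - 1 - k) = (pvRowTop W k).reverse := by
  unfold pvFk
  rw [if_neg (by omega), if_pos (by omega), show H - 1 - (H - 1 - k) = k from by omega]

lemma pvFk_succ_other (W H k j : Nat) (hk : 2 * k + 2 ≤ H) (hj : j < H)
    (h1 : j ≠ k) (h2 : j ≠ H - 1 - k) :
    pvFk W H (k + 1) j = pvFk W H k j := by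
  unfold pvFk
  split_ifs <;> first | rfl | (exfalso; omega)

lemma outer_fold (width height : Int) (W H : Nat) (hW : W = width.toNat)
    (hH : H = height.toNat) (hHpos : 0 < height) (k : Nat) (hk : k ≤ H / 2) :
    (pvCil k).foldl (pvOuterBody width height)
        ((List.range H).map (fun _ => List.replicate W (0 : Int)), 0)
      = ((List.range H).map (pvFk W H k), ((k * W : Nat) : Int)) := by
  induction k with
  | zero =>
      simp only [pvCil, List.range_zero, List.map_nil, List.foldl_nil]
      rw [Prod.mk.injEq]
      refine ⟨?_, by simp⟩
      apply map_range_congr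
      intro j hj
      unfold pvFk
      rw [if_neg (by omega), if_neg (by omega)]
  | succ k ih =>
      have hkH : k < H := by omega
      have h2k : 2 * k + 2 ≤ H := by omega
      have hcast : height = (H : Int) := by omega
      rw [show pvCil (k+1) = pvCil k ++ [(k:Int)] by
            unfold pvCil; rw [List.range_succ, List.map_append]; rfl,
          List.foldl_append, ih (by omega)]
      simp only [List.foldl_cons, List.foldl_nil]
      unfold pvOuterBody
      rw [inner_fold width W H hW (pvFk W H k) k hkH (pvFk_untouched W H k h2k)]
      unfold pvOuterUpd
      rw [pvRevRow_map H _ k hkH (pvRowTop W k) (by rw [if_pos rfl])]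
      have hidx : height - (k : Int) - 1 = ((H - 1 - k : Nat) : Int) := by
        rw [hcast]; omega
      rw [hidx, pvSetI_natCast _ (H - 1 - k) _ (by simp; omega), set_map_range]
      rw [Prod.mk.injEq]
      refine ⟨?_, rfl⟩
      apply map_range_congr
      intro j hj
      by_cases hjb : j = H - 1 - k
      · subst hjb
        rw [if_pos rfl, pvFk_succ_bot W H k h2k]
      · rw [if_neg hjb]
        by_cases hjr : j = k
        · rw [if_pos hjr, hjr, pvFk_succ_self W H k]
        · rw [if_neg hjr, pvFk_succ_other W H k j h2k hj hjr hjb]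

lemma mid_fold (width : Int) (W H K : Nat) (hW : W = width.toNat) (hK : K < H)
    (hFmid : pvFk W H K K = List.replicate W (0 : Int)) (n : Nat) (hn : n ≤ (W + 1) / 2) :
    (pvCil n).foldl (pvMidBody width (K : Int))
        ((List.range H).map (pvFk W H K), ((K * W : Nat) : Int))
      = ((List.range H).map (fun j => if j = K then pvRowMid W K n else pvFk W H K j),
         ((K * W + n : Nat) : Int)) := by
  induction n with
  | zero =>
      simp only [pvCil, List.range_zero, List.map_nil, List.foldl_nil]
      rw [Prod.mk.injEq]
      refine ⟨?_, by simp⟩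
      apply map_range_congr
      intro j hj
      by_cases hj' : j = K
      · subst hj'
        rw [if_pos rfl, hFmid]
        unfold pvRowMid
        apply List.ext_getElem
        · simp
        · intro i h1 h2
          simp only [List.getElem_replicate, List.getElem_map, List.getElem_range]
          rw [if_neg (by simp at h1; omega)]
      · rw [if_neg hj']
  | succ n ih =>
      have hn' : n ≤ (W + 1) / 2 := by omega
      have hnW : n < W := by omega
      have hwcast : width = (W : Int) := by omega
      rw [show pvCil (n+1) = pvCil n ++ [(n:Int)] by
            unfold pvCil; rw [List.range_succ, List.map_append]; rfl,
          List.foldl_append, ih hn']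
      simp only [List.foldl_cons, List.foldl_nil]
      unfold pvMidBody
      have hidx : width - (n : Int) - 1 = ((W - 1 - n : Nat) : Int) := by
        rw [hwcast]; omega
      rw [pvCell_set H _ K hK (pvRowMid W K n) (by rw [if_pos rfl]) n
            (by unfold pvRowMid; simp; omega) ((K * W + n : Nat) : Int), hidx]
      rw [pvCell_set H _ K hK ((pvRowMid W K n).set n ((K * W + n : Nat) : Int))
            (by rw [if_pos rfl]) (W - 1 - n)
            (by unfold pvRowMid; simp; omega) ((K * W + n : Nat) : Int)]
      unfold pvRowMid
      rw [set_map_range, set_map_range]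
      rw [Prod.mk.injEq]
      constructor
      · apply map_range_congr
        intro j hj
        by_cases hj' : j = K
        · subst hj'
          rw [if_pos rfl, if_pos rfl]
          apply map_range_congr
          intro c hc
          by_cases hc1 : c = W - 1 - n
          · subst hc1
            rw [if_pos rfl, if_pos (by omega)]
            congr 1
            omega
          · rw [if_neg hc1]
            by_cases hc2 : c = n
            · subst hc2
              rw [if_pos rfl, if_pos (by omega)]
              congr 1
              omega
            · rw [if_neg hc2]
              by_cases hc3 : c < n ∨ W ≤ c + n
              · rw [if_pos hc3, if_pos (by omega)]
              · rw [if_neg hc3, if_neg (by omega)]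
        · rw [if_neg hj', if_neg hj', if_neg hj', if_neg hj']
      · push_cast
        ring


lemma pvFloordiv_two_cast (h : Int) (hh : 0 ≤ h) :
    PySem.Int.floordiv h 2 = ((h.toNat / 2 : Nat) : Int) := by
  have h1 := pvFloordiv_toNat_two h
  have h2 : 0 ≤ PySem.Int.floordiv h 2 :=
    (PySem.Int.le_floordiv_iff_mul_le (by norm_num)).mpr (by omega)
  omega

lemma pvRange_natCast (n : Nat) :
    PySem.List.pyRange 0 ((n : Nat) : Int) 1 = pvCil n := by
  rw [pvRange_toNat]
  simp

lemma cell_eq_top (width height : Int) (W H j c : Nat) (hW : W = width.toNat)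
    (hH : H = height.toNat) (hj : j < H / 2) (hc : c < W) :
    pvAltValue width height ((H / 2 : Nat) : Int) ((j : Nat) : Int) ((c : Nat) : Int)
      = (if j % 2 = 0 then ((j * W + c : Nat) : Int) else ((j * W + (W - 1 - c) : Nat) : Int)) := by
  have hwc : width = (W : Int) := by omega
  unfold pvAltValue
  rw [if_pos (by omega)]
  by_cases hp : j % 2 = 0
  · have hb : (((j : Int)) % 2 == 0) = true := by
      have : ((j : Int)) % 2 = 0 := by omega
      simp [this]
    rw [if_pos hb, if_pos hp, hwc]
    push_cast
    ring
  · have hb : (((j : Int)) % 2 == 0) = false := by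
      have : ((j : Int)) % 2 = 1 := by omega
      simp [this]
    rw [if_neg (by simp [hb]), if_neg hp, hwc]
    have h1 : ((W : Int)) - 1 - (c : Int) = ((W - 1 - c : Nat) : Int) := by omega
    rw [h1]
    push_cast
    ring

lemma cell_eq_bot (width height : Int) (W H j c : Nat) (hW : W = width.toNat)
    (hH : H = height.toNat) (hj2 : H / 2 ≤ j) (hj : j < H) (hb : H - 1 - j < H / 2)
    (hc : c < W) :
    pvAltValue width height ((H / 2 : Nat) : Int) ((j : Nat) : Int) ((c : Nat) : Int)
      = (if (H - 1 - j) % 2 = 0 then (((H - 1 - j) * W + (W - 1 - c) : Nat) : Int)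
         else (((H - 1 - j) * W + c : Nat) : Int)) := by
  have hwc : width = (W : Int) := by omega
  have hm : height - 1 - ((j : Nat) : Int) = ((H - 1 - j : Nat) : Int) := by omega
  unfold pvAltValue
  rw [if_neg (by omega), hm, if_pos (by omega)]
  by_cases hp : (H - 1 - j) % 2 = 0
  · have hbb : ((((H - 1 - j : Nat) : Int)) % 2 == 0) = true := by
      have : (((H - 1 - j : Nat) : Int)) % 2 = 0 := by omega
      simp [this]
    rw [if_pos hbb, if_pos hp, hwc]
    have h1 : ((W : Int)) - 1 - (c : Int) = ((W - 1 - c : Nat) : Int) := by omega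
    rw [h1]
    push_cast
    ring
  · have hbb : ((((H - 1 - j : Nat) : Int)) % 2 == 0) = false := by
      have : (((H - 1 - j : Nat) : Int)) % 2 = 1 := by omega
      simp [this]
    rw [if_neg (by simp [hbb]), if_neg hp, hwc]
    push_cast
    ring

lemma cell_eq_mid (width height : Int) (W H c : Nat) (hW : W = width.toNat)
    (hH : H = height.toNat) (hodd : H % 2 = 1) (hc : c < W) :
    pvAltValue width height ((H / 2 : Nat) : Int) (((H / 2 : Nat) : Nat) : Int) ((c : Nat) : Int)
      = ((H / 2 * W + min c (W - 1 - c) : Nat) : Int) := by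
  have hwc : width = (W : Int) := by omega
  unfold pvAltValue
  rw [if_neg (by omega), if_neg (by omega), hwc]
  have h1 : ((W : Int)) - 1 - (c : Int) = ((W - 1 - c : Nat) : Int) := by omega
  rw [h1]
  push_cast [Nat.cast_min]
  ring

-- ===== VERDICT (by name: the statement is the Claim_ definition above) =====
theorem horizontal_swipes_matrix_core_py_spec : Claim_equal_horizontal_swipes_matrix_core_py := by
  intro width height _ hpre
  unfold Spec_horizontal_swipes_matrix_core_py
  unfold Pre_horizontal_swipes_matrix_core_py at hpre
  unfold horizontal_swipes_matrix_core_py horizontal_swipes_matrix_core_py_alt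
  rcases le_or_gt height 0 with hneg | hpos
  · -- height ≤ 0: both sides are []
    have hH0 : height.toNat = 0 := by omega
    rw [pvRange_toNat height, hH0]
    rw [pvRange_toNat (PySem.Int.floordiv height 2), pvFloordiv_toNat_two, hH0]
    simp only [pvCil, List.range_zero, List.map_nil, List.foldl_nil, Nat.zero_div]
    unfold pvFinish
    by_cases hpar : height % 2 = 1
    · rw [if_pos (by simp [hpar])]
      rw [pvRange_toNat (PySem.Int.floordiv (width + 1) 2), pvFloordiv_toNat_two]
      have hwle : width ≤ 0 := by omega
      have hmw : (width + 1).toNat / 2 = 0 := by omega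
      rw [hmw]
      simp [pvCil]
    · rw [if_neg (by simpa using hpar)]
  · -- height ≥ 1
    have hHpos : 0 < height.toNat := by omega
    rw [pvFloordiv_two_cast height (by omega)]
    rw [pvRange_toNat height, pvRange_natCast (height.toNat / 2), pvRange_toNat width]
    have hmat : (pvCil height.toNat).map (fun _ => List.replicate width.toNat (0 : Int))
        = (List.range height.toNat).map (fun _ => List.replicate width.toNat (0 : Int)) := by
      unfold pvCil
      rw [List.map_map]
      rfl
    rw [hmat, outer_fold width height width.toNat height.toNat rfl rfl hpos
          (height.toNat / 2) le_rfl]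
    unfold pvFinish
    by_cases hpar : height % 2 = 1
    · -- odd height: the middle loop runs
      have hodd : height.toNat % 2 = 1 := by omega
      rw [if_pos (by simp [hpar])]
      rw [pvRange_toNat (PySem.Int.floordiv (width + 1) 2), pvFloordiv_toNat_two,
          pvFloordiv_two_cast height (by omega)]
      rw [mid_fold width width.toNat height.toNat (height.toNat / 2) rfl (by omega)
            (by unfold pvFk; rw [if_neg (by omega), if_neg (by omega)])
            ((width + 1).toNat / 2) (by omega)]
      dsimp only
      unfold pvCil
      rw [List.map_map]
      apply map_range_congr
      intro j hj
      dsimp only [Function.comp]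
      rw [List.map_map]
      by_cases hjK : j = height.toNat / 2
      · rw [if_pos hjK, hjK]
        unfold pvRowMid
        apply map_range_congr
        intro c hc
        dsimp only [Function.comp]
        have hM : (width + 1).toNat / 2 = (width.toNat + 1) / 2 := by omega
        rw [if_pos (by omega), cell_eq_mid width height width.toNat height.toNat c rfl rfl hodd hc]
      · rw [if_neg hjK]
        unfold pvFk
        by_cases hjT : j < height.toNat / 2
        · rw [if_pos hjT]
          unfold pvRowTop
          apply map_range_congr
          intro c hc
          dsimp only [Function.comp]
          rw [cell_eq_top width height width.toNat height.toNat j c rfl rfl hjT hc]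
        · rw [if_neg hjT, if_pos (by omega)]
          unfold pvRowTop
          rw [reverse_map_range]
          apply map_range_congr
          intro c hc
          dsimp only [Function.comp]
          rw [cell_eq_bot width height width.toNat height.toNat j c rfl rfl (by omega) hj
                (by omega) hc]
          rw [show width.toNat - 1 - (width.toNat - 1 - c) = c from by omega]
    · -- even height: no middle loop
      have heven : height.toNat % 2 = 0 := by omega
      rw [if_neg (by simpa using hpar)]
      dsimp only
      unfold pvCil
      rw [List.map_map]
      apply map_range_congr
      intro j hj
      dsimp only [Function.comp]
      rw [List.map_map]
      unfold pvFk
      by_cases hjT : j < height.toNat / 2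
      · rw [if_pos hjT]
        unfold pvRowTop
        apply map_range_congr
        intro c hc
        dsimp only [Function.comp]
        rw [cell_eq_top width height width.toNat height.toNat j c rfl rfl hjT hc]
      · rw [if_neg hjT, if_pos (by omega)]
        unfold pvRowTop
        rw [reverse_map_range]
        apply map_range_congr
        intro c hc
        dsimp only [Function.comp]
        rw [cell_eq_bot width height width.toNat height.toNat j c rfl rfl (by omega) hj
              (by omega) hc]
        rw [show width.toNat - 1 - (width.toNat - 1 - c) = c from by omega]
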